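-- pv_equiv track=rewrite | github.com/grigorescu/Brownian | Brownian/view/utils/es.py | queryEscape
-- ===== SOURCE A (Python) =====
-- def queryEscape(query):
--     """Certain chars need to be escaped
--     """
--     bad_chars = [("\\", "\\\\"),
--         ("\"", "\\\""),
--         ("::", "\\:\\:")
--     ]
--     for char, replacement in bad_chars:
--         query = query.replace(char, replacement)
--
--     return query
-- ===== SOURCE B (Python) =====
-- def queryEscape(query):
--     """Certain chars need to be escaped
--     """
--     out = []
--     i = 0
--     n = len(query)
--     while i < n:
--         c = query[i]
--         if c == "\\":
--             out.append("\\\\")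
--             i += 1
--         elif c == "\"":
--             out.append("\\\"")
--             i += 1
--         elif c == ":" and i + 1 < n and query[i + 1] == ":":
--             out.append("\\:\\:")
--             i += 2
--         else:
--             out.append(c)
--             i += 1
--     return "".join(out)
-- ===== Notes on version B (the rewrite author's own statement) =====
-- stated objective: alternative
-- what changed: Replaced the three sequential str.replace passes (each rebuilding the whole string) by a single left-to-right scan with one-character lookahead that emits the escaped form of each character directly into an output buffer.
import Mathlib
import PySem

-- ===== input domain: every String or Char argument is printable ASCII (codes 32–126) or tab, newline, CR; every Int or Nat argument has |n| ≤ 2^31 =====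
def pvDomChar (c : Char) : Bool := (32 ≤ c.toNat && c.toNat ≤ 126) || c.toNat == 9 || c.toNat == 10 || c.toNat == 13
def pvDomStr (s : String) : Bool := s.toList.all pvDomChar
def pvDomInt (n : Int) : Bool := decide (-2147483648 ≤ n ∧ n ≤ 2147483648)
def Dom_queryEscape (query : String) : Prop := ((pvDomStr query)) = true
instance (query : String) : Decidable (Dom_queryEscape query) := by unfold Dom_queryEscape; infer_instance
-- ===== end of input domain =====

-- B replaces A's three sequential replace passes by one left-to-right scan with
-- one-character lookahead (objective: alternative single-pass decomposition, same O(n) cost).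

-- ===== PORT A =====
-- A: for (char, replacement) in the literal bad_chars list, query = query.replace(char, replacement)
def queryEscape (query : String) : String :=
  [("\\", "\\\\"), ("\"", "\\\""), ("::", "\\:\\:")].foldl
    (fun q p => PySem.Str.replace q p.1 p.2) query

-- ===== PORT B =====
-- B's while loop over the characters: emit the escape of the current char, with a
-- one-char lookahead for "::" (which consumes two chars); the recursion is the loop.
def escGo : List Char → List Char
  | [] => []
  | c :: t =>
    if c = '\\' then '\\' :: '\\' :: escGo t
    else if c = '"' then '\\' :: '"' :: escGo t
    else if c = ':' ∧ t.head? = some ':' then '\\' :: ':' :: '\\' :: ':' :: escGo t.tail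
    else c :: escGo t
termination_by s => s.length
decreasing_by
  all_goals simp_all

def queryEscape_alt (query : String) : String :=
  String.ofList (escGo query.toList)

-- ===== PRECONDITION & SPEC =====
def Spec_queryEscape (query : String) (out : String) : Prop := out = queryEscape_alt query
instance (query : String) (out : String) : Decidable (Spec_queryEscape query out) := by unfold Spec_queryEscape; infer_instance

-- ===== CLAIM (what is proved, stated in full; the proofs are below) =====
def Claim_equal_queryEscape : Prop := ∀ (query : String), Dom_queryEscape query → Spec_queryEscape query (queryEscape query)

-- ===== LEMMAS AND PROOFS =====

-- replace.go with enough fuel computes acc.reverse ++ the replacement from scratch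
theorem pv_go_fuel (old new : List Char) (hne : old ≠ []) :
    ∀ fuel (l acc : List Char), l.length ≤ fuel →
      PySem.Chars.replace.go old new fuel l acc =
        acc.reverse ++ PySem.Chars.replace.go old new l.length l [] := by
  intro fuel
  induction fuel using Nat.strong_induction_on with
  | _ fuel ih =>
    intro l acc h
    match fuel, l with
    | 0, l =>
      have : l = [] := List.eq_nil_of_length_eq_zero (Nat.le_zero.mp h)
      subst this
      simp [PySem.Chars.replace.go]
    | fuel + 1, [] => simp [PySem.Chars.replace.go]
    | fuel + 1, c :: t =>
      have hold : 1 ≤ old.length := by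
        cases old with | nil => exact absurd rfl hne | cons _ _ => simp
      rw [PySem.Chars.replace.go.eq_def old new (fuel+1) (c :: t) acc,
          show (c :: t).length = t.length + 1 from rfl,
          PySem.Chars.replace.go.eq_def old new (t.length + 1) (c :: t) []]
      simp only []
      have hdrop : (List.drop old.length (c :: t)).length ≤ t.length := by
        simp only [List.length_drop, List.length_cons]; omega
      have htf : t.length ≤ fuel := by simp at h; omega
      by_cases hp : old.isPrefixOf (c :: t) = true
      · simp only [hp, if_true]
        rw [ih fuel (by omega) _ _ (le_trans hdrop htf),
            ih t.length (by omega) _ _ hdrop]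
        simp
      · simp only [hp]
        rw [ih fuel (by omega) t (c :: acc) htf, ih t.length (by omega) t [c] (le_refl _)]
        simp

-- replace on a cons, when old matches at the front
theorem pv_replace_cons_prefix (old new : List Char) (hne : old ≠ []) (c : Char) (t : List Char)
    (hp : old.isPrefixOf (c :: t) = true) :
    PySem.Chars.replace (c :: t) old new =
      new ++ PySem.Chars.replace (List.drop old.length (c :: t)) old new := by
  have hemp : old.isEmpty = false := by cases old with | nil => exact absurd rfl hne | cons _ _ => rfl
  unfold PySem.Chars.replace
  simp only [hemp, Bool.false_eq_true, if_false]
  rw [PySem.Chars.replace.go.eq_def]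
  simp only [List.length_cons, hp, if_true]
  have hlen : (List.drop old.length (c :: t)).length ≤ t.length := by
    have h1 : 1 ≤ old.length := by
      cases old with | nil => exact absurd rfl hne | cons _ _ => simp
    simp only [List.length_drop, List.length_cons]; omega
  rw [pv_go_fuel old new hne t.length _ _ hlen]
  simp

-- replace on a cons, when old does not match at the front
theorem pv_replace_cons_not (old new : List Char) (hne : old ≠ []) (c : Char) (t : List Char)
    (hp : ¬ old.isPrefixOf (c :: t) = true) :
    PySem.Chars.replace (c :: t) old new = c :: PySem.Chars.replace t old new := by
  have hemp : old.isEmpty = false := by cases old with | nil => exact absurd rfl hne | cons _ _ => rfl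
  unfold PySem.Chars.replace
  simp only [hemp, Bool.false_eq_true, if_false]
  rw [PySem.Chars.replace.go.eq_def]
  simp only [List.length_cons, hp]
  rw [pv_go_fuel old new hne t.length t [c] (le_refl _)]
  simp

theorem pv_replace_nil (old new : List Char) (hne : old ≠ []) :
    PySem.Chars.replace [] old new = [] := by
  have hemp : old.isEmpty = false := by cases old with | nil => exact absurd rfl hne | cons _ _ => rfl
  unfold PySem.Chars.replace
  simp [hemp, PySem.Chars.replace.go]

-- abbreviations for the three passes (used only in the proofs)
def pvR1 (s : List Char) : List Char := PySem.Chars.replace s ['\\'] ['\\', '\\']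
def pvR2 (s : List Char) : List Char := PySem.Chars.replace s ['"'] ['\\', '"']
def pvR3 (s : List Char) : List Char := PySem.Chars.replace s [':', ':'] ['\\', ':', '\\', ':']

theorem pvR1_cons_bs (t : List Char) : pvR1 ('\\' :: t) = '\\' :: '\\' :: pvR1 t := by
  unfold pvR1
  rw [pv_replace_cons_prefix _ _ (by simp) _ _ (by simp [List.isPrefixOf])]
  rfl

theorem pvR1_cons (c : Char) (t : List Char) (h : c ≠ '\\') :
    pvR1 (c :: t) = c :: pvR1 t := by
  unfold pvR1
  rw [pv_replace_cons_not _ _ (by simp) _ _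
    (by simp [List.isPrefixOf]; exact fun hc => h hc.symm)]

theorem pvR2_cons_q (t : List Char) : pvR2 ('"' :: t) = '\\' :: '"' :: pvR2 t := by
  unfold pvR2
  rw [pv_replace_cons_prefix _ _ (by simp) _ _ (by simp [List.isPrefixOf])]
  rfl

theorem pvR2_cons (c : Char) (t : List Char) (h : c ≠ '"') :
    pvR2 (c :: t) = c :: pvR2 t := by
  unfold pvR2
  rw [pv_replace_cons_not _ _ (by simp) _ _
    (by simp [List.isPrefixOf]; exact fun hc => h hc.symm)]

theorem pv_colon_prefix_iff (c : Char) (t : List Char) :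
    ([':', ':'] : List Char).isPrefixOf (c :: t) = true ↔ (c = ':' ∧ t.head? = some ':') := by
  cases t with
  | nil => simp [List.isPrefixOf]
  | cons d t' =>
    simp only [List.isPrefixOf, Bool.and_eq_true, beq_iff_eq, List.head?_cons, Option.some.injEq]
    constructor
    · rintro ⟨a, b, -⟩; exact ⟨a.symm, b.symm⟩
    · rintro ⟨a, b⟩; exact ⟨a.symm, b.symm, trivial⟩

theorem pvR3_cons2 (t : List Char) :
    pvR3 (':' :: ':' :: t) = '\\' :: ':' :: '\\' :: ':' :: pvR3 t := by
  unfold pvR3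
  rw [pv_replace_cons_prefix _ _ (by simp) _ _ ((pv_colon_prefix_iff ':' (':' :: t)).mpr (by simp))]
  rfl

theorem pvR3_cons (c : Char) (t : List Char) (h : ¬ (c = ':' ∧ t.head? = some ':')) :
    pvR3 (c :: t) = c :: pvR3 t := by
  unfold pvR3
  rw [pv_replace_cons_not _ _ (by simp) _ _ (by rw [pv_colon_prefix_iff]; exact h)]

theorem pvR1_nil : pvR1 [] = [] := pv_replace_nil _ _ (by simp)
theorem pvR2_nil : pvR2 [] = [] := pv_replace_nil _ _ (by simp)
theorem pvR3_nil : pvR3 [] = [] := pv_replace_nil _ _ (by simp)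

-- the first char after the first two passes is ':' iff the original first char is ':'
theorem pv_head_colon (t : List Char) :
    (pvR2 (pvR1 t)).head? = some ':' ↔ t.head? = some ':' := by
  cases t with
  | nil => simp [pvR1_nil, pvR2_nil]
  | cons c t' =>
    by_cases h1 : c = '\\'
    · subst h1
      rw [pvR1_cons_bs, pvR2_cons _ _ (by decide), pvR2_cons _ _ (by decide)]
      simp
    · rw [pvR1_cons c t' h1]
      by_cases h2 : c = '"'
      · subst h2
        rw [pvR2_cons_q]
        simp
      · rw [pvR2_cons c _ h2]
        simp

-- the heart: the three passes compose to the single scan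
theorem pv_main (s : List Char) : pvR3 (pvR2 (pvR1 s)) = escGo s := by
  induction s using escGo.induct with
  | case1 => rw [pvR1_nil, pvR2_nil, pvR3_nil, escGo]
  | case2 t ih =>
    rw [pvR1_cons_bs, pvR2_cons _ _ (by decide), pvR2_cons _ _ (by decide),
      pvR3_cons _ _ (by simp), pvR3_cons _ _ (by simp), ih, escGo]
    simp
  | case3 t h1 ih =>
    rw [pvR1_cons _ _ (by decide), pvR2_cons_q,
      pvR3_cons _ _ (by simp), pvR3_cons _ _ (by simp), ih, escGo]
    simp
  | case4 c t h1 h2 h ih =>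
    obtain ⟨hc, hh⟩ := h
    subst hc
    obtain ⟨t', rfl⟩ : ∃ t', t = ':' :: t' := by
      cases t with
      | nil => simp at hh
      | cons d t' =>
        simp at hh
        subst hh
        exact ⟨t', rfl⟩
    rw [pvR1_cons _ _ (by decide), pvR1_cons _ _ (by decide),
      pvR2_cons _ _ (by decide), pvR2_cons _ _ (by decide)]
    rw [show (':' :: t').tail = t' from rfl] at ih
    rw [pvR3_cons2, ih, escGo]
    simp
  | case5 c t h1 h2 h3 ih =>
    rw [pvR1_cons _ _ h1, pvR2_cons _ _ h2,
      pvR3_cons _ _ (fun hx => h3 ⟨hx.1, (pv_head_colon t).mp hx.2⟩), ih, escGo]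
    simp [h1, h2, h3]

-- ===== VERDICT (by name: the statement is the Claim_ definition above) =====
theorem queryEscape_spec : Claim_equal_queryEscape := by
  intro query _
  unfold Spec_queryEscape queryEscape queryEscape_alt
  simp only [List.foldl]
  rw [← pv_main query.toList]
  simp only [PySem.Str.replace, pvR1, pvR2, pvR3]
  simp
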